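-- pv_equiv track=rewrite | github.com/CallumJHays/pytorch-gui | pytorchgui/pytorchgui.py | str_lessthan
-- ===== SOURCE A (Python) =====
-- def str_lessthan(str1, str2):
--     """
--     Compares alphabetical IDs.
--     """
--     str1_val = 0
--     str2_val = 0
--
--     for i, str_char in enumerate(reversed(str1)):
--         str1_val += (ord(str_char) - ord('a') + 1) * pow(26, i)
--
--     for i, str_char in enumerate(reversed(str2)):
--         str2_val += (ord(str_char) - ord('a') + 1) * pow(26, i)
--
--     return str1_val < str2_val
-- ===== SOURCE B (Python) =====
-- def str_lessthan(str1, str2):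
--     """
--     Compares alphabetical IDs.
--     """
--     def value(s):
--         # single forward pass, Horner's rule: no reversal, no pow()
--         v = 0
--         for c in s:
--             v = v * 26 + (ord(c) - 96)
--         return v
--
--     return value(str1) < value(str2)
-- ===== Notes on version B (the rewrite author's own statement) =====
-- stated objective: faster
-- what changed: Replaces the two reversed-enumerate loops that recompute pow(26,i) at every position with a single forward Horner-rule pass (v = v*26 + digit) per string.
import Mathlib
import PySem

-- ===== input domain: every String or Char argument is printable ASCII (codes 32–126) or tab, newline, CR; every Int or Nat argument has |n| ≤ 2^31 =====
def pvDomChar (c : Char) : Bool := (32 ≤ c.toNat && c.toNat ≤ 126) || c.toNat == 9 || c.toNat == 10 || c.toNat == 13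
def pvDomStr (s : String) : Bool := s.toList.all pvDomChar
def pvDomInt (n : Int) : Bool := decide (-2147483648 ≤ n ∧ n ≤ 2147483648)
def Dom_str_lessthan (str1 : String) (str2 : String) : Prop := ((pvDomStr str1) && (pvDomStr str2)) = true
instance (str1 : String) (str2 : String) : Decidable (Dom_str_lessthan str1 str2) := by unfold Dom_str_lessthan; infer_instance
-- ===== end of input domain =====

-- B replaces A's two reversed-enumerate loops with pow(26,i) by one forward
-- Horner-rule pass (v = v*26 + digit) per string; same return value everywhere.

-- ===== PORT A =====
-- A's loop 'for i, c in enumerate(reversed(s)): val += (ord(c)-ord('a')+1)*pow(26,i)'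
def str_lessthan (str1 : String) (str2 : String) : Bool :=
  let str1_val : Int := (PySem.List.enumerate str1.toList.reverse).foldl
    (fun acc p => acc + ((p.2.toNat : Int) - ('a'.toNat : Int) + 1) * 26 ^ p.1.toNat) 0
  let str2_val : Int := (PySem.List.enumerate str2.toList.reverse).foldl
    (fun acc p => acc + ((p.2.toNat : Int) - ('a'.toNat : Int) + 1) * 26 ^ p.1.toNat) 0
  decide (str1_val < str2_val)

-- ===== PORT B =====
-- B's helper 'value(s)': forward Horner pass, v = v*26 + (ord(c) - 96)
def pvHornerValue (s : String) : Int :=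
  s.toList.foldl (fun v c => v * 26 + ((c.toNat : Int) - 96)) 0

def str_lessthan_alt (str1 : String) (str2 : String) : Bool :=
  decide (pvHornerValue str1 < pvHornerValue str2)

-- ===== PRECONDITION & SPEC =====
def Spec_str_lessthan (str1 : String) (str2 : String) (out : Bool) : Prop := out = str_lessthan_alt str1 str2
instance (str1 : String) (str2 : String) (out : Bool) : Decidable (Spec_str_lessthan str1 str2 out) := by unfold Spec_str_lessthan; infer_instance

-- ===== CLAIM (what is proved, stated in full; the proofs are below) =====
def Claim_equal_str_lessthan : Prop := ∀ (str1 : String) (str2 : String), Dom_str_lessthan str1 str2 → Spec_str_lessthan str1 str2 (str_lessthan str1 str2)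

-- ===== LEMMAS AND PROOFS =====

-- the summand of A's loop
def pvTerm (p : Int × Char) : Int := ((p.2.toNat : Int) - ('a'.toNat : Int) + 1) * 26 ^ p.1.toNat

-- shifting the enumerate start by one multiplies every summand by 26
lemma pvShift (rl : List Char) (s : Nat) :
    ((PySem.List.enumerate rl ((s : Int) + 1)).map pvTerm).sum
      = 26 * ((PySem.List.enumerate rl (s : Int)).map pvTerm).sum := by
  induction rl generalizing s with
  | nil => simp [PySem.List.enumerate_nil]
  | cons c t ih =>
    have h1 : ((s : Int) + 1) = ((s + 1 : Nat) : Int) := by push_cast; ring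
    have h2 : ((s : Int) + 1 + 1) = ((s + 1 : Nat) : Int) + 1 := by push_cast; ring
    simp only [PySem.List.enumerate_cons, List.map_cons, List.sum_cons, h1, ih (s + 1)]
    simp only [pvTerm]
    have : ((s + 1 : Nat) : Int).toNat = (s : Int).toNat + 1 := by omega
    rw [this, pow_succ]
    ring

-- Horner's rule over l equals A's power sum over l.reverse
lemma pvHorner_eq (l : List Char) :
    l.foldl (fun v c => v * 26 + ((c.toNat : Int) - 96)) 0
      = ((PySem.List.enumerate l.reverse 0).map pvTerm).sum := by
  induction l using List.reverseRecOn with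
  | nil => simp [PySem.List.enumerate_nil]
  | append_singleton t c ih =>
    rw [List.foldl_append, List.foldl_cons, List.foldl_nil, ih, List.reverse_append]
    have h0 : (0 : Int) + 1 = ((0 : Nat) : Int) + 1 := by norm_num
    simp only [List.reverse_cons, List.reverse_nil, List.nil_append, List.singleton_append,
      PySem.List.enumerate_cons, List.map_cons, List.sum_cons, h0, pvShift t.reverse 0]
    have ha : 'a'.toNat = 97 := by decide
    simp only [pvTerm, ha]
    norm_num
    ring

-- ===== VERDICT (by name: the statement is the Claim_ definition above) =====
theorem str_lessthan_spec : Claim_equal_str_lessthan := by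
  intro str1 str2 _
  unfold Spec_str_lessthan
  simp only [str_lessthan, str_lessthan_alt, pvHornerValue, pvHorner_eq,
    PySem.List.foldl_add, zero_add]
  rfl
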